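-- pv_equiv track=rewrite | github.com/rachelriemersma/comp-363-f25-week12 | max_flow.py | find_reachable
-- ===== SOURCE A (Python) =====
-- def find_reachable(residual: list[list[int]], source: int) -> set[int]:
--     """
--     find all the verticies that are reachable from the source in the residual
--     Args:
--         residual: residual graph as adjacency matrix
--         source: the starting vertex
--     returns: set of vertex indices that can be reached from source
--     """
--     n = len(residual)
--     # start w source
--     reachable = set([source])
--     # verticies to explore
--     stack = [source]
--     while len(stack) > 0:
--         # vertex to explore
--         u = stack.pop()
--         # check neighbors and if we can reach v from u
--         for v in range(n):
--             if residual[u][v] > 0 and v not in reachable: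
--                 # its reachable and we need to explore it
--                 reachable.add(v)
--                 stack.append(v)
--     return reachable
-- ===== SOURCE B (Python) =====
-- def find_reachable(residual: list[list[int]], source: int) -> set[int]:
--     """Round-based saturation: repeatedly add every neighbour of the current
--     reachable set until a round adds nothing (at most n rounds are needed)."""
--     n = len(residual)
--     reachable = {source}
--     for _ in range(n):
--         bigger = reachable | {v for u in reachable for v in range(n) if residual[u][v] > 0}
--         if len(bigger) == len(reachable):
--             break
--         reachable = bigger
--     return reachable
-- ===== Notes on version B (the rewrite author's own statement) =====
-- stated objective: alternative
-- what changed: A's explicit-stack DFS (pop a vertex, push newly seen neighbours) is replaced by round-based saturation: repeatedly union the reachable set with all neighbours of its members until a round adds nothing (at most n rounds), with no stack or per-vertex worklist.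
-- outside the precondition, e.g. on find_reachable([[0, 0], [0]], 0): A returns {0}, B returns {0}; on find_reachable([[0, 1, 0], [0, 0, 0], [0, 0]], 0): A returns {0, 1}, B returns {0, 1}
import Mathlib
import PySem

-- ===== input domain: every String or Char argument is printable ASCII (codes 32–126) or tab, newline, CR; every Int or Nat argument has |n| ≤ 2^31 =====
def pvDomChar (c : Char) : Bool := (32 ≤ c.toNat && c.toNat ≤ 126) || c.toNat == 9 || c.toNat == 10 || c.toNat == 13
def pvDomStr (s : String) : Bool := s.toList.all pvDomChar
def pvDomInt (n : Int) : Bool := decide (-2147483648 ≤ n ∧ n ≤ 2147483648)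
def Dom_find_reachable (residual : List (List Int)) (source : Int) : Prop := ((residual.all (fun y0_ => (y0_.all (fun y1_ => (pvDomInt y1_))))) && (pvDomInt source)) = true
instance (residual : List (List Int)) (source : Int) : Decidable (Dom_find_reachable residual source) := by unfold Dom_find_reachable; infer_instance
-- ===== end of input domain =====

-- B is a round-based saturation of the reachable set instead of A's explicit-stack DFS
-- (objective: alternative decomposition, same result set).
-- Both Pythons return a SET; Python's set iteration order is not modelled by PySem, so both
-- ports return the canonical ascending representation of that set (sorted without a key).

-- residual[u][v], total form; every access is in range under Pre_ (it is only used there)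
def pvMat (residual : List (List Int)) (u v : Int) : Int :=
  PySem.List.pyGetD (PySem.List.pyGetD residual u []) v 0

-- ===== PORT A =====
-- the while-loop; fuel 2*n+2 is proven sufficient below (the loop runs at most 2n+1
-- iterations), so the fuel guard is a totality device only.
-- The stack is kept top-first: Python's append → cons, pop() → head (same LIFO behaviour).
def pvLoopA (residual : List (List Int)) (n : Nat) :
    Nat → PySem.Set Int × List Int → PySem.Set Int
  | 0, rs => rs.1
  | fuel + 1, (reachable, stack) =>
    match stack with
    | [] => reachable
    | u :: rest =>
      let rs' := (PySem.List.pyRange 0 (n : Int) 1).foldl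
        (fun rs v =>
          if 0 < pvMat residual u v ∧ ¬ PySem.Set.contains rs.1 v then
            (PySem.Set.add rs.1 v, v :: rs.2)
          else rs)
        (reachable, rest)
      pvLoopA residual n fuel rs'

def find_reachable (residual : List (List Int)) (source : Int) : List Int :=
  let n := residual.length
  let reachable : PySem.Set Int := PySem.Set.ofList [source]
  let stack : List Int := [source]
  PySem.List.sorted (pvLoopA residual n (2 * n + 2) (reachable, stack)) (fun x => x) false

-- ===== PORT B =====
-- one round: reachable | {v for u in reachable for v in range(n) if residual[u][v] > 0}
def pvStep (residual : List (List Int)) (n : Nat) (S : PySem.Set Int) : PySem.Set Int :=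
  PySem.Set.union S
    (S.foldl
      (fun acc u =>
        (PySem.List.pyRange 0 (n : Int) 1).foldl
          (fun acc2 v => if 0 < pvMat residual u v then PySem.Set.add acc2 v else acc2)
          acc)
      PySem.Set.empty)

-- the 'for _ in range(n)' loop with the break when a round adds nothing
def pvLoopB (residual : List (List Int)) (n : Nat) : Nat → PySem.Set Int → PySem.Set Int
  | 0, S => S
  | k + 1, S =>
    let bigger := pvStep residual n S
    if PySem.Set.len bigger = PySem.Set.len S then S else pvLoopB residual n k bigger

def find_reachable_alt (residual : List (List Int)) (source : Int) : List Int :=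
  let n := residual.length
  PySem.List.sorted (pvLoopB residual n n (PySem.Set.ofList [source])) (fun x => x) false

-- ===== PRECONDITION & SPEC =====
-- Pre_ excludes inputs where A raises IndexError: a source outside Python's index range
-- -n..n-1 (for n > 0), and matrices with a row shorter than n (A raises when such a row is
-- reached; for the unreached-short-row case, where A still returns, both programs agree —
-- the closed-form row-length bound merely over-approximates, see claim cites).
def Pre_find_reachable (residual : List (List Int)) (source : Int) : Prop :=
  residual = [] ∨
    ((∀ row ∈ residual, residual.length ≤ row.length) ∧
      -(residual.length : Int) ≤ source ∧ source < (residual.length : Int))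
instance (residual : List (List Int)) (source : Int) : Decidable (Pre_find_reachable residual source) := by unfold Pre_find_reachable; infer_instance

def pvWitness_find_reachable : List (List Int) × Int := ([[0, 1], [0, 0]], 0)

def Spec_find_reachable (residual : List (List Int)) (source : Int) (out : List Int) : Prop := out = find_reachable_alt residual source
instance (residual : List (List Int)) (source : Int) (out : List Int) : Decidable (Spec_find_reachable residual source out) := by unfold Spec_find_reachable; infer_instance

-- ===== CLAIM (what is proved, stated in full; the proofs are below) =====
def Claim_equal_find_reachable : Prop := ∀ (residual : List (List Int)) (source : Int), Dom_find_reachable residual source → Pre_find_reachable residual source → Spec_find_reachable residual source (find_reachable residual source)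

-- ===== LEMMAS AND PROOFS =====

-- the edge relation of the residual graph (proof-only abstraction)
def pvE (residual : List (List Int)) (u v : Int) : Prop :=
  0 ≤ v ∧ v < (residual.length : Int) ∧ 0 < pvMat residual u v

def pvSound (residual : List (List Int)) (source : Int) (S : List Int) : Prop :=
  ∀ x ∈ S, Relation.ReflTransGen (pvE residual) source x

def pvClosed (residual : List (List Int)) (S : List Int) : Prop :=
  ∀ u ∈ S, ∀ v, pvE residual u v → v ∈ S

def pvBound (residual : List (List Int)) (source : Int) (S : List Int) : Prop :=
  ∀ x ∈ S, x = source ∨ (0 ≤ x ∧ x < (residual.length : Int))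

-- a sound set is contained in any closed set containing the source
theorem pv_min {residual : List (List Int)} {source : Int} {S T : List Int}
    (hS : pvSound residual source S) (hsrc : source ∈ T)
    (hT : pvClosed residual T) : ∀ x ∈ S, x ∈ T := by
  have key : ∀ y, Relation.ReflTransGen (pvE residual) source y → y ∈ T := by
    intro y hy
    induction hy with
    | refl => exact hsrc
    | tail _ he ih => exact hT _ ih _ he
  exact fun x hx => key x (hS x hx)

theorem pv_len_le {l l' : List Int} (h : l.Nodup) (hs : ∀ x ∈ l, x ∈ l') :
    l.length ≤ l'.length := by
  calc l.length = l.toFinset.card := (List.toFinset_card_of_nodup h).symm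
    _ ≤ l'.toFinset.card := Finset.card_le_card (fun x hx => by
        simpa using hs x (by simpa using hx))
    _ ≤ l'.length := List.toFinset_card_le l'

theorem pvBound_length {residual : List (List Int)} {source : Int} {S : List Int}
    (h1 : S.Nodup) (h2 : pvBound residual source S) :
    S.length ≤ residual.length + 1 := by
  have := pv_len_le h1 (l' := source :: PySem.List.pyRange 0 (residual.length : Int) 1)
    (fun x hx => by
      rcases h2 x hx with h | h
      · exact h ▸ List.mem_cons_self ..
      · exact List.mem_cons_of_mem _ (PySem.List.mem_pyRange_one.mpr ⟨h.1, h.2⟩))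
  simpa [PySem.List.length_pyRange_one] using this

-- ---------- A side ----------

-- the body of A's inner for-loop
def pvFA (residual : List (List Int)) (u : Int) :
    (PySem.Set Int × List Int) → Int → (PySem.Set Int × List Int) := fun rs v =>
  if 0 < pvMat residual u v ∧ ¬ PySem.Set.contains rs.1 v then
    (PySem.Set.add rs.1 v, v :: rs.2)
  else rs

theorem pvFoldA_spec (residual : List (List Int)) (u : Int) :
    ∀ (vs : List Int) (r s : List Int),
    (∀ x ∈ r, x ∈ (vs.foldl (pvFA residual u) (r, s)).1) ∧
    (∀ x ∈ (vs.foldl (pvFA residual u) (r, s)).1,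
        x ∈ r ∨ (x ∈ vs ∧ 0 < pvMat residual u x)) ∧
    (∀ x ∈ s, x ∈ (vs.foldl (pvFA residual u) (r, s)).2) ∧
    (∀ x ∈ (vs.foldl (pvFA residual u) (r, s)).2,
        x ∈ s ∨ x ∈ (vs.foldl (pvFA residual u) (r, s)).1) ∧
    (r.Nodup → (vs.foldl (pvFA residual u) (r, s)).1.Nodup) ∧
    ((vs.foldl (pvFA residual u) (r, s)).1.length + s.length =
        r.length + (vs.foldl (pvFA residual u) (r, s)).2.length) ∧
    (∀ v ∈ vs, 0 < pvMat residual u v → v ∈ (vs.foldl (pvFA residual u) (r, s)).1) ∧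
    (∀ x ∈ (vs.foldl (pvFA residual u) (r, s)).1,
        x ∈ r ∨ x ∈ (vs.foldl (pvFA residual u) (r, s)).2) ∧
    (r.length ≤ (vs.foldl (pvFA residual u) (r, s)).1.length) := by
  intro vs
  induction vs with
  | nil =>
    intro r s
    refine ⟨fun x hx => hx, fun x hx => Or.inl hx, fun x hx => hx,
      fun x hx => Or.inl hx, id, rfl, by simp, fun x hx => Or.inl hx, le_rfl⟩
  | cons v vs ih =>
    intro r s
    by_cases h : 0 < pvMat residual u v ∧ v ∉ r
    · have hstep : pvFA residual u (r, s) v = (r ++ [v], v :: s) := by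
        simp [pvFA, h.1, h.2]
      rw [List.foldl_cons, hstep]
      obtain ⟨i1, i2, i3, i4, i5, i6, i7, i8, i9⟩ := ih (r ++ [v]) (v :: s)
      refine ⟨fun x hx => i1 x (by simp [hx]), ?_, ?_, ?_, ?_, by simp at i6 ⊢; omega,
        ?_, ?_, by simp at i9; omega⟩
      · intro x hx
        rcases i2 x hx with hx' | hx'
        · rcases List.mem_append.mp hx' with h' | h'
          · exact Or.inl h'
          · simp at h'; exact Or.inr ⟨by simp [h'], h' ▸ h.1⟩
        · exact Or.inr ⟨List.mem_cons_of_mem _ hx'.1, hx'.2⟩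
      · intro x hx; exact i3 x (List.mem_cons_of_mem _ hx)
      · intro x hx
        rcases i4 x hx with hx' | hx'
        · rcases List.mem_cons.mp hx' with h' | h'
          · exact Or.inr (i1 x (by simp [h']))
          · exact Or.inl h'
        · exact Or.inr hx'
      · intro hr
        refine i5 ?_
        rw [List.nodup_append]
        exact ⟨hr, List.nodup_singleton _,
          by simpa using fun a ha (hav : a = v) => h.2 (hav ▸ ha)⟩
      · intro w hw hmat
        rcases List.mem_cons.mp hw with h' | h'
        · exact h' ▸ i1 v (by simp)
        · exact i7 w h' hmat
      · intro x hx
        rcases i8 x hx with hx' | hx'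
        · rcases List.mem_append.mp hx' with h' | h'
          · exact Or.inl h'
          · simp at h'
            exact Or.inr (i3 x (by simp [h']))
        · exact Or.inr hx'
    · have hstep : pvFA residual u (r, s) v = (r, s) := by
        by_cases hm : 0 < pvMat residual u v
        · have hvr : v ∈ r := by by_contra hc; exact h ⟨hm, hc⟩
          simp [pvFA, hvr]
        · simp [pvFA, hm]
      rw [List.foldl_cons, hstep]
      obtain ⟨i1, i2, i3, i4, i5, i6, i7, i8, i9⟩ := ih r s
      refine ⟨i1, ?_, i3, i4, i5, i6, ?_, i8, i9⟩
      · intro x hx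
        rcases i2 x hx with hx' | hx'
        · exact Or.inl hx'
        · exact Or.inr ⟨List.mem_cons_of_mem _ hx'.1, hx'.2⟩
      · intro w hw hmat
        rcases List.mem_cons.mp hw with h' | h'
        · have hvr : v ∈ r := by
            by_contra hc
            exact h ⟨h' ▸ hmat, hc⟩
          exact i1 w (by rw [h']; exact hvr)
        · exact i7 w h' hmat

def pvInvA (residual : List (List Int)) (source : Int) (r s : List Int) : Prop :=
  r.Nodup ∧ (∀ x ∈ s, x ∈ r) ∧ pvSound residual source r ∧ pvBound residual source r ∧
  (∀ u ∈ r, u ∈ s ∨ ∀ v, pvE residual u v → v ∈ r)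

theorem pvLoopA_spec (residual : List (List Int)) (source : Int) :
    ∀ (fuel : Nat) (r s : List Int), pvInvA residual source r s →
    s.length + 2 * (residual.length + 1 - r.length) ≤ fuel →
    (∀ x ∈ r, x ∈ pvLoopA residual residual.length fuel (r, s)) ∧
    (pvLoopA residual residual.length fuel (r, s)).Nodup ∧
    pvSound residual source (pvLoopA residual residual.length fuel (r, s)) ∧
    pvBound residual source (pvLoopA residual residual.length fuel (r, s)) ∧
    pvClosed residual (pvLoopA residual residual.length fuel (r, s)) := by
  intro fuel
  induction fuel with
  | zero =>
    intro r s ⟨h1, h2, h3, h4, h5⟩ hphi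
    have hs : s = [] := List.eq_nil_of_length_eq_zero (by omega)
    subst hs
    exact ⟨fun x hx => hx, h1, h3, h4, fun u hu => (h5 u hu).resolve_left (by simp)⟩
  | succ fuel ih =>
    intro r s hinv hphi
    obtain ⟨h1, h2, h3, h4, h5⟩ := hinv
    match s with
    | [] =>
      exact ⟨fun x hx => hx, h1, h3, h4,
        fun u hu => (h5 u hu).resolve_left (by simp)⟩
    | u :: rest =>
      have hu_r : u ∈ r := h2 u (by simp)
      obtain ⟨i1, i2, i3, i4, i5, i6, i7, i8, i9⟩ :=
        pvFoldA_spec residual u (PySem.List.pyRange 0 (residual.length : Int) 1) r rest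
      set rs' := (PySem.List.pyRange 0 (residual.length : Int) 1).foldl
        (pvFA residual u) (r, rest) with hrs'
      have hshow : pvLoopA residual residual.length (fuel + 1) (r, u :: rest) =
          pvLoopA residual residual.length fuel rs' := rfl
      have hnodup' : rs'.1.Nodup := i5 h1
      have hsound' : pvSound residual source rs'.1 := by
        intro x hx
        rcases i2 x hx with hx' | hx'
        · exact h3 x hx'
        · obtain ⟨hrange, hmat⟩ := hx'
          obtain ⟨hlo, hhi⟩ := PySem.List.mem_pyRange_one.mp hrange
          exact Relation.ReflTransGen.tail (h3 u hu_r) ⟨hlo, hhi, hmat⟩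
      have hbound' : pvBound residual source rs'.1 := by
        intro x hx
        rcases i2 x hx with hx' | hx'
        · exact h4 x hx'
        · obtain ⟨hlo, hhi⟩ := PySem.List.mem_pyRange_one.mp hx'.1
          exact Or.inr ⟨hlo, hhi⟩
      have hinv' : pvInvA residual source rs'.1 rs'.2 := by
        refine ⟨hnodup', ?_, hsound', hbound', ?_⟩
        · intro x hx
          rcases i4 x hx with hx' | hx'
          · exact i1 x (h2 x (List.mem_cons_of_mem _ hx'))
          · exact hx'
        · intro w hw
          rcases i8 w hw with hw' | hw'
          · rcases h5 w hw' with hw'' | hw''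
            · rcases List.mem_cons.mp hw'' with h' | h'
              · subst h'
                refine Or.inr (fun v hv => i7 v ?_ hv.2.2)
                exact PySem.List.mem_pyRange_one.mpr ⟨hv.1, hv.2.1⟩
              · exact Or.inl (i3 w h')
            · exact Or.inr (fun v hv => i1 v (hw'' v hv))
          · exact Or.inl hw'
      have hlen' : rs'.1.length ≤ residual.length + 1 :=
        pvBound_length hnodup' hbound'
      have hphi' : rs'.2.length + 2 * (residual.length + 1 - rs'.1.length) ≤ fuel := by
        simp only [List.length_cons] at hphi
        omega
      obtain ⟨o1, o2, o3, o4, o5⟩ := ih rs'.1 rs'.2 hinv' hphi'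
      rw [hshow]
      exact ⟨fun x hx => o1 x (i1 x hx), o2, o3, o4, o5⟩

-- ---------- B side ----------

-- the body of B's inner comprehension loop
def pvFB (residual : List (List Int)) (u : Int) : PySem.Set Int → Int → PySem.Set Int :=
  fun acc2 v => if 0 < pvMat residual u v then PySem.Set.add acc2 v else acc2

theorem pvFoldB_inner (residual : List (List Int)) (u : Int) :
    ∀ (vs : List Int) (acc : PySem.Set Int) (x : Int),
    x ∈ vs.foldl (pvFB residual u) acc ↔
      x ∈ acc ∨ (x ∈ vs ∧ 0 < pvMat residual u x) := by
  intro vs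
  induction vs with
  | nil => simp
  | cons v vs ih =>
    intro acc x
    by_cases h : 0 < pvMat residual u v
    · rw [List.foldl_cons, show pvFB residual u acc v = PySem.Set.add acc v by
        simp [pvFB, h], ih]
      constructor
      · rintro (hx | hx)
        · rcases (PySem.Set.mem_add acc v x).mp hx with hx' | hx'
          · exact Or.inl hx'
          · exact Or.inr ⟨by simp [hx'], hx' ▸ h⟩
        · exact Or.inr ⟨List.mem_cons_of_mem _ hx.1, hx.2⟩
      · rintro (hx | ⟨hx1, hx2⟩)
        · exact Or.inl ((PySem.Set.mem_add acc v x).mpr (Or.inl hx))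
        · rcases List.mem_cons.mp hx1 with h' | h'
          · exact Or.inl ((PySem.Set.mem_add acc v x).mpr (Or.inr h'))
          · exact Or.inr ⟨h', hx2⟩
    · rw [List.foldl_cons, show pvFB residual u acc v = acc by simp [pvFB, h], ih]
      constructor
      · rintro (hx | hx)
        · exact Or.inl hx
        · exact Or.inr ⟨List.mem_cons_of_mem _ hx.1, hx.2⟩
      · rintro (hx | ⟨hx1, hx2⟩)
        · exact Or.inl hx
        · rcases List.mem_cons.mp hx1 with h' | h'
          · exact absurd (h' ▸ hx2) h
          · exact Or.inr ⟨h', hx2⟩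

theorem pvFoldB_outer (residual : List (List Int)) :
    ∀ (us : List Int) (acc : PySem.Set Int) (x : Int),
    x ∈ us.foldl (fun acc u =>
        (PySem.List.pyRange 0 (residual.length : Int) 1).foldl (pvFB residual u) acc)
        acc ↔
      x ∈ acc ∨ ∃ u ∈ us, pvE residual u x := by
  intro us
  induction us with
  | nil => simp
  | cons u us ih =>
    intro acc x
    rw [List.foldl_cons, ih]
    constructor
    · rintro (hx | ⟨w, hw1, hw2⟩)
      · rcases (pvFoldB_inner residual u _ acc x).mp hx with hx' | ⟨hx1, hx2⟩
        · exact Or.inl hx'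
        · obtain ⟨hlo, hhi⟩ := PySem.List.mem_pyRange_one.mp hx1
          exact Or.inr ⟨u, by simp, hlo, hhi, hx2⟩
      · exact Or.inr ⟨w, List.mem_cons_of_mem _ hw1, hw2⟩
    · rintro (hx | ⟨w, hw1, hw2⟩)
      · exact Or.inl ((pvFoldB_inner residual u _ acc x).mpr (Or.inl hx))
      · rcases List.mem_cons.mp hw1 with h' | h'
        · subst h'
          exact Or.inl ((pvFoldB_inner residual w _ acc x).mpr
            (Or.inr ⟨PySem.List.mem_pyRange_one.mpr ⟨hw2.1, hw2.2.1⟩, hw2.2.2⟩))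
        · exact Or.inr ⟨w, h', hw2⟩

theorem pvStep_mem (residual : List (List Int)) (S : PySem.Set Int) (x : Int) :
    x ∈ pvStep residual residual.length S ↔ x ∈ S ∨ ∃ u ∈ S, pvE residual u x := by
  unfold pvStep
  rw [PySem.Set.mem_union]
  constructor
  · rintro (hx | hx)
    · exact Or.inl hx
    · rcases (pvFoldB_outer residual S PySem.Set.empty x).mp hx with hx' | hx'
      · simp [PySem.Set.empty] at hx'
      · exact Or.inr hx'
  · rintro (hx | hx)
    · exact Or.inl hx
    · exact Or.inr ((pvFoldB_outer residual S PySem.Set.empty x).mpr (Or.inr hx))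

theorem pvStep_nodup (residual : List (List Int)) (S : PySem.Set Int)
    (hS : S.Nodup) : (pvStep residual residual.length S).Nodup :=
  PySem.Set.nodup_union _ _ hS

def pvInvB (residual : List (List Int)) (source : Int) (S : List Int) : Prop :=
  S.Nodup ∧ pvSound residual source S ∧ pvBound residual source S ∧ source ∈ S

theorem pvLoopB_spec (residual : List (List Int)) (source : Int) :
    ∀ (k : Nat) (S : PySem.Set Int), pvInvB residual source S →
    (∀ x ∈ S, x ∈ pvLoopB residual residual.length k S) ∧
    pvInvB residual source (pvLoopB residual residual.length k S) ∧
    (pvClosed residual (pvLoopB residual residual.length k S) ∨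
      S.length + k ≤ (pvLoopB residual residual.length k S).length) := by
  intro k
  induction k with
  | zero =>
    intro S hinv
    exact ⟨fun x hx => hx, hinv, Or.inr (by show S.length + 0 ≤ S.length; omega)⟩
  | succ k ih =>
    intro S hinv
    obtain ⟨h1, h2, h3, h4⟩ := hinv
    have hsub : ∀ x ∈ S, x ∈ pvStep residual residual.length S :=
      fun x hx => (pvStep_mem residual S x).mpr (Or.inl hx)
    by_cases hlen : PySem.Set.len (pvStep residual residual.length S) = PySem.Set.len S
    · have hshow : pvLoopB residual residual.length (k + 1) S =
          (if PySem.Set.len (pvStep residual residual.length S) = PySem.Set.len S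
            then S
            else pvLoopB residual residual.length k
              (pvStep residual residual.length S)) := rfl
      rw [hshow, if_pos hlen]
      have hlen' : (pvStep residual residual.length S).length = S.length := by
        simpa [PySem.Set.len] using hlen
      -- equal sizes + inclusion + nodup → the step added nothing, so S is closed
      have hback : ∀ x ∈ pvStep residual residual.length S, x ∈ S := by
        have hfsub : S.toFinset ⊆ (pvStep residual residual.length S).toFinset := by
          intro x hx; simpa using hsub x (by simpa using hx)
        have hfeq := Finset.eq_of_subset_of_card_le hfsub (by
          rw [List.toFinset_card_of_nodup h1]
          calc (pvStep residual residual.length S).toFinset.card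
              ≤ (pvStep residual residual.length S).length := List.toFinset_card_le _
            _ = S.length := hlen')
        intro x hx
        have : x ∈ S.toFinset := hfeq ▸ (by simpa using hx)
        simpa using this
      refine ⟨fun x hx => hx, ⟨h1, h2, h3, h4⟩, Or.inl ?_⟩
      intro w hw v hv
      exact hback v ((pvStep_mem residual S v).mpr (Or.inr ⟨w, hw, hv⟩))
    · have hshow : pvLoopB residual residual.length (k + 1) S =
          pvLoopB residual residual.length k (pvStep residual residual.length S) := by
        rw [show pvLoopB residual residual.length (k + 1) S =
          (if PySem.Set.len (pvStep residual residual.length S) = PySem.Set.len S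
            then S
            else pvLoopB residual residual.length k
              (pvStep residual residual.length S)) from rfl, if_neg hlen]
      rw [hshow]
      have hinv' : pvInvB residual source (pvStep residual residual.length S) := by
        refine ⟨pvStep_nodup residual S h1, ?_, ?_, hsub source h4⟩
        · intro x hx
          rcases (pvStep_mem residual S x).mp hx with hx' | ⟨w, hw1, hw2⟩
          · exact h2 x hx'
          · exact Relation.ReflTransGen.tail (h2 w hw1) hw2
        · intro x hx
          rcases (pvStep_mem residual S x).mp hx with hx' | ⟨w, hw1, hw2⟩
          · exact h3 x hx'
          · exact Or.inr ⟨hw2.1, hw2.2.1⟩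
      have hgrow : S.length < (pvStep residual residual.length S).length := by
        have hle : S.length ≤ (pvStep residual residual.length S).length :=
          pv_len_le h1 hsub
        have hne : (pvStep residual residual.length S).length ≠ S.length := by
          intro hc; exact hlen (by simp [PySem.Set.len, hc])
        omega
      obtain ⟨o1, o2, o3⟩ := ih (pvStep residual residual.length S) hinv'
      refine ⟨fun x hx => o1 x (hsub x hx), o2, ?_⟩
      rcases o3 with o3 | o3
      · exact Or.inl o3
      · exact Or.inr (by omega)

-- a bounded Nodup set of size n+1 contains every vertex 0..n-1, hence is closed
theorem pvFull_closed (residual : List (List Int)) (source : Int) (T : List Int)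
    (h1 : T.Nodup) (h2 : pvBound residual source T)
    (h3 : residual.length + 1 ≤ T.length) : pvClosed residual T := by
  have hsub : T.toFinset ⊆
      (source :: PySem.List.pyRange 0 (residual.length : Int) 1).toFinset := by
    intro x hx
    simp only [List.mem_toFinset] at hx ⊢
    rcases h2 x hx with h | h
    · exact h ▸ List.mem_cons_self ..
    · exact List.mem_cons_of_mem _ (PySem.List.mem_pyRange_one.mpr ⟨h.1, h.2⟩)
  have hfeq := Finset.eq_of_subset_of_card_le hsub (by
    calc (source :: PySem.List.pyRange 0 (residual.length : Int) 1).toFinset.card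
        ≤ (source :: PySem.List.pyRange 0 (residual.length : Int) 1).length :=
          List.toFinset_card_le _
      _ = residual.length + 1 := by simp [PySem.List.length_pyRange_one]
      _ ≤ T.length := h3
      _ = T.toFinset.card := (List.toFinset_card_of_nodup h1).symm)
  intro u _ v hv
  have hvmem : v ∈ (source :: PySem.List.pyRange 0 (residual.length : Int) 1) :=
    List.mem_cons_of_mem _ (PySem.List.mem_pyRange_one.mpr ⟨hv.1, hv.2.1⟩)
  have : v ∈ T.toFinset := by
    rw [hfeq]; simpa using hvmem
  simpa using this

-- ---------- assembling the two results ----------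

theorem pvA_props (residual : List (List Int)) (source : Int) :
    source ∈ pvLoopA residual residual.length (2 * residual.length + 2)
        ([source], [source]) ∧
    (pvLoopA residual residual.length (2 * residual.length + 2)
        ([source], [source])).Nodup ∧
    pvSound residual source (pvLoopA residual residual.length (2 * residual.length + 2)
        ([source], [source])) ∧
    pvClosed residual (pvLoopA residual residual.length (2 * residual.length + 2)
        ([source], [source])) := by
  have hinv : pvInvA residual source [source] [source] := by
    refine ⟨List.nodup_singleton _, fun x hx => hx, ?_, ?_, ?_⟩
    · intro x hx
      simp at hx
      exact hx ▸ Relation.ReflTransGen.refl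
    · intro x hx
      simp at hx
      exact Or.inl hx
    · intro u hu
      exact Or.inl hu
  obtain ⟨o1, o2, o3, o4, o5⟩ := pvLoopA_spec residual source
    (2 * residual.length + 2) [source] [source] hinv (by simp; omega)
  exact ⟨o1 source (by simp), o2, o3, o5⟩

theorem pvB_props (residual : List (List Int)) (source : Int) :
    source ∈ pvLoopB residual residual.length residual.length [source] ∧
    (pvLoopB residual residual.length residual.length [source]).Nodup ∧
    pvSound residual source (pvLoopB residual residual.length residual.length [source]) ∧
    pvClosed residual (pvLoopB residual residual.length residual.length [source]) := by
  have hinv : pvInvB residual source [source] := by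
    refine ⟨List.nodup_singleton _, ?_, ?_, by simp⟩
    · intro x hx
      simp at hx
      exact hx ▸ Relation.ReflTransGen.refl
    · intro x hx
      simp at hx
      exact Or.inl hx
  obtain ⟨o1, o2, o3⟩ := pvLoopB_spec residual source residual.length [source] hinv
  obtain ⟨n1, n2, n3, n4⟩ := o2
  refine ⟨o1 source (by simp), n1, n2, ?_⟩
  rcases o3 with o3 | o3
  · exact o3
  · exact pvFull_closed residual source _ n1 n3 (by simp at o3; omega)

-- ===== VERDICT (by name: the statement is the Claim_ definition above) =====
theorem find_reachable_spec : Claim_equal_find_reachable := by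
  intro residual source _ _
  unfold Spec_find_reachable find_reachable find_reachable_alt
  obtain ⟨a1, a2, a3, a4⟩ := pvA_props residual source
  obtain ⟨b1, b2, b3, b4⟩ := pvB_props residual source
  have hofl : PySem.Set.ofList [source] = ([source] : List Int) := rfl
  rw [hofl]
  have hperm : (pvLoopA residual residual.length (2 * residual.length + 2)
      ([source], [source])).Perm
      (pvLoopB residual residual.length residual.length [source]) := by
    rw [List.perm_ext_iff_of_nodup a2 b2]
    intro x
    exact ⟨fun hx => pv_min a3 b1 b4 x hx, fun hx => pv_min b3 a1 a4 x hx⟩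
  refine List.Perm.eq_of_pairwise (le := fun a b => a ≤ b)
    (fun a b _ _ h1 h2 => le_antisymm h1 h2) ?_ ?_
    (((PySem.List.sorted_perm _ _ _).trans hperm).trans
      (PySem.List.sorted_perm _ _ _).symm)
  · exact PySem.List.sorted_pairwise _ _
  · exact PySem.List.sorted_pairwise _ _
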